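-- pv_equiv track=rewrite | github.com/yangjung-woo/KT-Workspace | KT_coding_masters/2차 코딩마스터즈/basic19.py | solution
-- ===== SOURCE A (Python) =====
-- from itertools import combinations
--
-- def is_prime(N): # 소수 판별
--     if N < 2:
--         return False
--     for i in range(2, int(N ** 0.5) + 1):
--         if N % i == 0:
--             return False
--     return True
--
-- def generate_pseudo_primes(N):# N 보다 작은  유사 소수 Set을 생성
--     primes = [i for i in range(2, N) if is_prime(i)]
--     pseudo_primes = set()
--     for i in range(len(primes)):
--         for j in range(i + 1, len(primes)):
--             product = primes[i] * primes[j]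
--             if product <= N:
--                 pseudo_primes.add(product)
--     return sorted(pseudo_primes)
--
-- def solution(N): # 4분할 하면 유사 소수 3개 이상의 합으로 표현 가능한지 판별별
--     # 유사 소수 생성
--     pseudo_primes = generate_pseudo_primes(N)
--
--     # 4개의 서로 다른 수로 분할을 시도
--     for comb in combinations(range(1,N), 4): # # 1부터 N-1까지 모든 숫자에서 조합 생성
--         if sum(comb) == N:
--             pseudo_prime_count = sum(1 for x in comb if x in pseudo_primes)
--             if pseudo_prime_count >= 3:
--                 return "possible"
--     return "impossible"
-- ===== SOURCE B (Python) =====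
-- # B: instead of scanning all 4-element subsets of [1, N) (O(N^4)), enumerate only
-- # triples of semiprimes from the sorted semiprime list and solve for the fourth
-- # value directly (O(M^3) for M = #semiprimes <= N); prime/semiprime generation as in A.
-- def _is_prime(n):
--     if n < 2:
--         return False
--     for i in range(2, int(n ** 0.5) + 1):
--         if n % i == 0:
--             return False
--     return True
--
-- def _semiprimes(N):
--     primes = [p for p in range(2, N) if _is_prime(p)]
--     out = set()
--     for i in range(len(primes)):
--         for j in range(i + 1, len(primes)):
--             pq = primes[i] * primes[j]
--             if pq <= N:
--                 out.add(pq)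
--     return sorted(out)
--
-- def solution(N):
--     pps = _semiprimes(N)
--     M = len(pps)
--     for i in range(M):
--         for j in range(i + 1, M):
--             for k in range(j + 1, M):
--                 d = N - pps[i] - pps[j] - pps[k]
--                 if d >= 1 and d != pps[i] and d != pps[j] and d != pps[k]:
--                     return "possible"
--     return "impossible"
-- ===== Notes on version B (the rewrite author's own statement) =====
-- stated objective: faster
-- what changed: A scans every four-element subset of the positive integers below N for one summing to N with at least three semiprimes; B enumerates only triples of semiprimes from the sorted semiprime list and solves for the fourth value directly, checking positivity and distinctness.
import Mathlib
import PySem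

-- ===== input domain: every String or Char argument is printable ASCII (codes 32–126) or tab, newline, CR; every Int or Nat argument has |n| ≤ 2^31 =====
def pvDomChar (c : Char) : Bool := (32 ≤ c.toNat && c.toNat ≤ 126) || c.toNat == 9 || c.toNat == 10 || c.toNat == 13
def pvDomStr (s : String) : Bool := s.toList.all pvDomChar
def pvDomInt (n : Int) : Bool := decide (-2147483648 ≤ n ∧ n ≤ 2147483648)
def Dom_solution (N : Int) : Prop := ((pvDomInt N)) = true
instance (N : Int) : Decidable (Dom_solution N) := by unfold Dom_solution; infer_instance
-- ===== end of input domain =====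

-- B replaces A's scan of all 4-element subsets of the positive integers below N by a scan of semiprime
-- triples with the fourth value solved directly (objective: faster).

-- ===== PORT A =====
-- helpers shared by both ports: the two Pythons' prime/semiprime generation is identical.
-- int(n**0.5) is ported as Nat.sqrt: exact for 0 ≤ n ≤ 2^31 (the stated domain).
def isPrime (n : Int) : Bool :=
  if n < 2 then false
  else (PySem.List.pyRange 2 ((n.toNat.sqrt : Nat) + 1) 1).all (fun i => !(PySem.Int.mod n i == 0))

def primesList (N : Int) : List Int := (PySem.List.pyRange 2 N 1).filter isPrime

-- inner loop "for j in range(i+1, len)"; iterating over the suffix after primes[i]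
def addProds (N p : Int) : List Int → PySem.Set Int → PySem.Set Int
  | [], s => s
  | q :: qs, s => addProds N p qs (if p * q ≤ N then PySem.Set.add s (p * q) else s)

-- outer loop "for i in range(len)"
def prodSet (N : Int) : List Int → PySem.Set Int → PySem.Set Int
  | [], s => s
  | p :: ps, s => prodSet N ps (addProds N p ps s)

def pseudoPrimes (N : Int) : List Int :=
  PySem.List.sorted (prodSet N (primesList N) PySem.Set.empty) (fun x => x) false

-- "for comb in combinations(range(1, N), 4): ... return \"possible\"" — the combinations
-- are consumed lazily with early return, so the port walks CPython's combination order
-- without materialising the list: anyComb f r xs = (PySem.List.combinations xs r).any f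
-- (proved below as anyComb_eq).
def anyComb : (List Int → Bool) → Nat → List Int → Bool
  | f, 0, _ => f []
  | _, _ + 1, [] => false
  | f, r + 1, x :: xs => anyComb (fun l => f (x :: l)) r xs || anyComb f (r + 1) xs

def solution (N : Int) : String :=
  let pp := pseudoPrimes N
  if anyComb (fun l => l.sum == N && decide (3 ≤ l.countP (fun x => pp.contains x)))
      4 (PySem.List.pyRange 1 N 1)
  then "possible" else "impossible"

-- ===== PORT B =====
def ok4 (N x y z : Int) : Bool :=
  let d := N - x - y - z
  decide (1 ≤ d) && !(d == x) && !(d == y) && !(d == z)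

-- B's three index loops over later indices of the sorted list, as structural
-- recursion over suffixes (same traversal order, same tests).
def any1 (N x y : Int) : List Int → Bool
  | [] => false
  | z :: zs => ok4 N x y z || any1 N x y zs

def any2 (N x : Int) : List Int → Bool
  | [] => false
  | y :: ys => any1 N x y ys || any2 N x ys

def any3 (N : Int) : List Int → Bool
  | [] => false
  | x :: xs => any2 N x xs || any3 N xs

def solution_alt (N : Int) : String :=
  if any3 N (pseudoPrimes N) then "possible" else "impossible"

-- ===== PRECONDITION & SPEC =====
def Spec_solution (N : Int) (out : String) : Prop := out = solution_alt N
instance (N : Int) (out : String) : Decidable (Spec_solution N out) := by unfold Spec_solution; infer_instance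

-- ===== CLAIM (what is proved, stated in full; the proofs are below) =====
def Claim_equal_solution : Prop := ∀ (N : Int), Dom_solution N → Spec_solution N (solution N)

-- ===== LEMMAS AND PROOFS =====

-- the lazy combination walk is any-over-combinations
theorem anyComb_eq (xs : List Int) : ∀ (f : List Int → Bool) (r : Nat),
    anyComb f r xs = (PySem.List.combinations xs r).any f := by
  induction xs with
  | nil =>
    intro f r
    cases r with
    | zero => simp [anyComb, PySem.List.combinations_zero]
    | succ r => simp [anyComb, PySem.List.combinations_nil_succ]
  | cons x xs ih =>
    intro f r
    cases r with
    | zero => simp [anyComb, PySem.List.combinations_zero]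
    | succ r =>
      rw [anyComb, PySem.List.combinations_cons_succ, List.any_append, List.any_map, ih, ih]
      rfl

-- membership in the semiprime set built by the two loops
theorem mem_addProds (N p : Int) (qs : List Int) (s : PySem.Set Int) (v : Int) :
    v ∈ addProds N p qs s ↔ v ∈ s ∨ ∃ q ∈ qs, p * q ≤ N ∧ v = p * q := by
  induction qs generalizing s with
  | nil => simp [addProds]
  | cons q qs ih =>
    rw [addProds, ih]
    by_cases h : p * q ≤ N
    · rw [if_pos h]
      constructor
      · rintro (hs | hq)
        · rw [PySem.Set.mem_add] at hs
          rcases hs with hs | rfl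
          · exact Or.inl hs
          · exact Or.inr ⟨q, List.mem_cons_self, h, rfl⟩
        · obtain ⟨q', hq', hle, rfl⟩ := hq
          exact Or.inr ⟨q', List.mem_cons_of_mem _ hq', hle, rfl⟩
      · rintro (hs | ⟨q', hq', hle, rfl⟩)
        · exact Or.inl ((PySem.Set.mem_add _ _ _).2 (Or.inl hs))
        · rcases List.mem_cons.1 hq' with rfl | hq'
          · exact Or.inl ((PySem.Set.mem_add _ _ _).2 (Or.inr rfl))
          · exact Or.inr ⟨q', hq', hle, rfl⟩
    · rw [if_neg h]
      constructor
      · rintro (hs | ⟨q', hq', hle, rfl⟩)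
        · exact Or.inl hs
        · exact Or.inr ⟨q', List.mem_cons_of_mem _ hq', hle, rfl⟩
      · rintro (hs | ⟨q', hq', hle, rfl⟩)
        · exact Or.inl hs
        · rcases List.mem_cons.1 hq' with rfl | hq'
          · exact absurd hle h
          · exact Or.inr ⟨q', hq', hle, rfl⟩

theorem mem_prodSet (N : Int) (ps : List Int) (s : PySem.Set Int) (v : Int)
    (hps : ps.Pairwise (· < ·)) :
    v ∈ prodSet N ps s ↔ v ∈ s ∨ ∃ p q : Int, p ∈ ps ∧ q ∈ ps ∧ p < q ∧ p * q ≤ N ∧ v = p * q := by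
  induction ps generalizing s with
  | nil => simp [prodSet]
  | cons p ps ih =>
    rcases List.pairwise_cons.1 hps with ⟨hlt, hps'⟩
    rw [prodSet, ih (addProds N p ps s) hps', mem_addProds]
    constructor
    · rintro ((hv | ⟨q, hq, hle, hv⟩) | ⟨a, b, ha, hb, hab, hle, hv⟩)
      · exact Or.inl hv
      · exact Or.inr ⟨p, q, List.mem_cons_self, List.mem_cons_of_mem _ hq, hlt q hq, hle, hv⟩
      · exact Or.inr ⟨a, b, List.mem_cons_of_mem _ ha, List.mem_cons_of_mem _ hb, hab, hle, hv⟩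
    · rintro (hv | ⟨a, b, ha, hb, hab, hle, hv⟩)
      · exact Or.inl (Or.inl hv)
      · rcases List.mem_cons.1 ha with rfl | ha2
        · rcases List.mem_cons.1 hb with rfl | hb2
          · omega
          · exact Or.inl (Or.inr ⟨b, hb2, hle, hv⟩)
        · rcases List.mem_cons.1 hb with rfl | hb2
          · exact absurd hab (by have := hlt a ha2; omega)
          · exact Or.inr ⟨a, b, ha2, hb2, hab, hle, hv⟩

theorem nodup_addProds (N p : Int) (qs : List Int) (s : PySem.Set Int) (h : s.Nodup) :
    (addProds N p qs s).Nodup := by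
  induction qs generalizing s with
  | nil => exact h
  | cons q qs ih =>
    rw [addProds]
    apply ih
    split
    · exact PySem.Set.nodup_add _ _ h
    · exact h

theorem nodup_prodSet (N : Int) (ps : List Int) (s : PySem.Set Int) (h : s.Nodup) :
    (prodSet N ps s).Nodup := by
  induction ps generalizing s with
  | nil => exact h
  | cons p ps ih => exact ih _ (nodup_addProds N p ps s h)

theorem primesList_pairwise (N : Int) : (primesList N).Pairwise (· < ·) :=
  (PySem.List.pairwise_lt_pyRange_one 2 N).filter _

theorem pseudoPrimes_pairwise (N : Int) : (pseudoPrimes N).Pairwise (· < ·) := by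
  have hle := PySem.List.sorted_pairwise (prodSet N (primesList N) PySem.Set.empty) (fun x => x)
  have hnd : (pseudoPrimes N).Nodup :=
    ((PySem.List.sorted_perm (prodSet N (primesList N) PySem.Set.empty) (fun x => x) false).symm).nodup
      (nodup_prodSet N _ _ List.nodup_nil)
  exact (hle.and hnd).imp (fun h => lt_of_le_of_ne h.1 h.2)

theorem pseudoPrimes_ge_six (N : Int) : ∀ v ∈ pseudoPrimes N, 6 ≤ v := by
  intro v hv
  rw [pseudoPrimes, PySem.List.mem_sorted] at hv
  rw [mem_prodSet N _ _ v (primesList_pairwise N)] at hv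
  rcases hv with hv | ⟨p, q, hp, hq, hpq, _, rfl⟩
  · simp [PySem.Set.empty] at hv
  · have h2 : 2 ≤ p := by
      have := (PySem.List.mem_pyRange_one).1 (List.mem_of_mem_filter hp)
      omega
    have h3 : 3 ≤ q := by omega
    nlinarith

-- a strictly increasing list of members of a strictly increasing list is a sublist
theorem sublist_of_pairwise_subset :
    ∀ (r l : List Int), r.Pairwise (· < ·) → l.Pairwise (· < ·) →
      (∀ a ∈ l, a ∈ r) → l.Sublist r := by
  intro r
  induction r with
  | nil =>
    intro l _ _ hsub
    cases l with
    | nil => exact List.Sublist.refl _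
    | cons x xs => exact absurd (hsub x List.mem_cons_self) (List.not_mem_nil)
  | cons y ys ih =>
    intro l hr hl hsub
    rcases List.pairwise_cons.1 hr with ⟨hy, hys⟩
    cases l with
    | nil => exact List.nil_sublist _
    | cons x xs =>
      rcases List.pairwise_cons.1 hl with ⟨hx, hxs⟩
      by_cases hxy : x = y
      · subst hxy
        apply List.Sublist.cons₂
        apply ih xs hys hxs
        intro a ha
        have : a ∈ x :: ys := hsub a (List.mem_cons_of_mem _ ha)
        rcases List.mem_cons.1 this with rfl | h
        · exact absurd (hx a ha) (by omega)
        · exact h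
      · apply List.Sublist.cons
        apply ih (x :: xs) hys hl
        intro a ha
        have hxin : x ∈ ys := by
          rcases List.mem_cons.1 (hsub x List.mem_cons_self) with h | h
          · exact absurd h hxy
          · exact h
        have hyx : y < x := hy x hxin
        have hax : x ≤ a := by
          rcases List.mem_cons.1 ha with rfl | h
          · exact le_refl _
          · exact le_of_lt (hx a h)
        rcases List.mem_cons.1 (hsub a ha) with rfl | h
        · omega
        · exact h

-- B's search succeeds iff some increasing semiprime triple works
theorem any1_iff (N x y : Int) (zs : List Int) :
    any1 N x y zs = true ↔ ∃ z ∈ zs, ok4 N x y z = true := by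
  induction zs with
  | nil => simp [any1]
  | cons z zs ih => simp [any1, ih]

theorem any2_iff (N x : Int) (ys : List Int) :
    any2 N x ys = true ↔ ∃ y z : Int, [y, z].Sublist ys ∧ ok4 N x y z = true := by
  induction ys with
  | nil => simp [any2]
  | cons y' ys ih =>
    rw [any2, Bool.or_eq_true, any1_iff, ih]
    constructor
    · rintro (⟨z, hz, hok⟩ | ⟨y, z, hsub, hok⟩)
      · exact ⟨y', z, List.cons_sublist_cons.2 (List.singleton_sublist.2 hz), hok⟩
      · exact ⟨y, z, hsub.cons _, hok⟩
    · rintro ⟨y, z, hsub, hok⟩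
      rcases List.sublist_cons_iff.1 hsub with h | ⟨r, hr, hrs⟩
      · exact Or.inr ⟨y, z, h, hok⟩
      · injection hr with h1 h2
        subst h1; subst h2
        exact Or.inl ⟨z, List.singleton_sublist.1 hrs, hok⟩

theorem any3_iff (N : Int) (xs : List Int) :
    any3 N xs = true ↔ ∃ x y z : Int, [x, y, z].Sublist xs ∧ ok4 N x y z = true := by
  induction xs with
  | nil => simp [any3]
  | cons x' xs ih =>
    rw [any3, Bool.or_eq_true, any2_iff, ih]
    constructor
    · rintro (⟨y, z, hsub, hok⟩ | ⟨x, y, z, hsub, hok⟩)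
      · exact ⟨x', y, z, List.cons_sublist_cons.2 hsub, hok⟩
      · exact ⟨x, y, z, hsub.cons _, hok⟩
    · rintro ⟨x, y, z, hsub, hok⟩
      rcases List.sublist_cons_iff.1 hsub with h | ⟨r, hr, hrs⟩
      · exact Or.inr ⟨x, y, z, h, hok⟩
      · injection hr with h1 h2
        subst h1; subst h2
        exact Or.inl ⟨y, z, hrs, hok⟩

-- the heart: A's quadruple search succeeds iff B's triple search does
theorem pairwise_nodup {l : List Int} (h : l.Pairwise (· < ·)) : l.Nodup :=
  h.imp (fun hab => ne_of_lt hab)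

theorem search_iff (N : Int) :
    ((PySem.List.combinations (PySem.List.pyRange 1 N 1) 4).any
      (fun l => l.sum == N && decide (3 ≤ l.countP (fun x => (pseudoPrimes N).contains x))) = true)
    ↔ any3 N (pseudoPrimes N) = true := by
  rw [List.any_eq_true, any3_iff]
  constructor
  · rintro ⟨l, hl, hf⟩
    rw [PySem.List.mem_combinations_iff] at hl
    obtain ⟨hsub, hlen⟩ := hl
    rw [Bool.and_eq_true, beq_iff_eq, decide_eq_true_iff] at hf
    obtain ⟨hsum, hcnt⟩ := hf
    have hlp : l.Pairwise (· < ·) := List.Pairwise.sublist hsub (PySem.List.pairwise_lt_pyRange_one 1 N)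
    set t := l.filter (fun x => (pseudoPrimes N).contains x) with ht
    have htlen : 3 ≤ t.length := by
      rw [ht, ← List.countP_eq_length_filter]; exact hcnt
    have htsub : t.Sublist l := List.filter_sublist
    have hulen : (t.take 3).length = 3 := by
      rw [List.length_take]; omega
    have husub : (t.take 3).Sublist l := (List.take_sublist 3 t).trans htsub
    obtain ⟨x, y, z, hu⟩ := List.length_eq_three.1 hulen
    have humem : ∀ a ∈ t.take 3, (pseudoPrimes N).contains a = true := by
      intro a ha
      exact (List.mem_filter.1 (List.mem_of_mem_take ha)).2
    have hup : (t.take 3).Pairwise (· < ·) := List.Pairwise.sublist husub hlp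
    obtain ⟨w, hperm⟩ := husub.exists_perm_append
    have hwlen : w.length = 1 := by
      have := hperm.length_eq
      rw [List.length_append, hulen] at this
      omega
    obtain ⟨d, rfl⟩ := List.length_eq_one_iff.1 hwlen
    have hsum' : x + y + z + d = N := by
      have h2 := hperm.sum_eq
      rw [hu] at h2
      simp at h2
      rw [h2] at hsum
      omega
    have hnd : ((t.take 3) ++ [d]).Nodup := hperm.nodup (pairwise_nodup hlp)
    rw [hu] at hnd
    have hdne : d ≠ x ∧ d ≠ y ∧ d ≠ z := by
      simp at hnd
      tauto
    have hdmem : d ∈ l := hperm.symm.subset (by simp)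
    have hd1 : 1 ≤ d := ((PySem.List.mem_pyRange_one).1 (hsub.subset hdmem)).1
    refine ⟨x, y, z, ?_, ?_⟩
    · apply sublist_of_pairwise_subset _ _ (pseudoPrimes_pairwise N) (hu ▸ hup)
      intro a ha
      have : a ∈ t.take 3 := hu ▸ ha
      exact List.contains_iff_mem.1 (humem a this)
    · simp only [ok4, Bool.and_eq_true, decide_eq_true_iff, Bool.not_eq_eq_eq_not,
        Bool.not_true, beq_eq_false_iff_ne, ne_eq]
      refine ⟨⟨⟨by omega, by omega⟩, by omega⟩, by omega⟩
  · rintro ⟨x, y, z, hsub, hok⟩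
    have hxyz : x < y ∧ y < z := by
      have := List.Pairwise.sublist hsub (pseudoPrimes_pairwise N)
      simp [List.pairwise_cons] at this
      tauto
    have hmem : x ∈ pseudoPrimes N ∧ y ∈ pseudoPrimes N ∧ z ∈ pseudoPrimes N := by
      refine ⟨hsub.subset ?_, hsub.subset ?_, hsub.subset ?_⟩ <;> simp
    have h6 : 6 ≤ x ∧ 6 ≤ y ∧ 6 ≤ z :=
      ⟨pseudoPrimes_ge_six N x hmem.1, pseudoPrimes_ge_six N y hmem.2.1,
        pseudoPrimes_ge_six N z hmem.2.2⟩
    simp only [ok4, Bool.and_eq_true, decide_eq_true_iff, Bool.not_eq_eq_eq_not,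
      Bool.not_true, beq_eq_false_iff_ne, ne_eq] at hok
    set d := N - x - y - z with hd
    obtain ⟨⟨⟨hd1, hdx⟩, hdy⟩, hdz⟩ := hok
    have hcontains : ∀ a, a ∈ pseudoPrimes N → (pseudoPrimes N).contains a = true :=
      fun a ha => List.contains_iff_mem.2 ha
    -- the four candidate values, in increasing order
    have hpos : d < x ∨ (x < d ∧ d < y) ∨ (y < d ∧ d < z) ∨ z < d := by omega
    have main : ∀ m : List Int, m.Pairwise (· < ·) → m.sum = N →
        (∀ a ∈ m, 1 ≤ a ∧ a < N) → [x, y, z].Sublist m → m.length = 4 →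
        ∃ l ∈ PySem.List.combinations (PySem.List.pyRange 1 N 1) 4,
          (l.sum == N && decide (3 ≤ l.countP (fun x => (pseudoPrimes N).contains x))) = true := by
      intro m hmp hmsum hmrange hmsub hmlen
      refine ⟨m, ?_, ?_⟩
      · rw [PySem.List.mem_combinations_iff]
        refine ⟨sublist_of_pairwise_subset _ _ (PySem.List.pairwise_lt_pyRange_one 1 N) hmp ?_,
          hmlen⟩
        intro a ha
        rw [PySem.List.mem_pyRange_one]
        exact ⟨(hmrange a ha).1, (hmrange a ha).2⟩
      · rw [Bool.and_eq_true, beq_iff_eq, decide_eq_true_iff]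
        refine ⟨hmsum, ?_⟩
        calc (3 : Nat) = List.countP (fun a => (pseudoPrimes N).contains a) [x, y, z] := by
              simp [hmem.1, hmem.2.1, hmem.2.2]
          _ ≤ _ := hmsub.countP_le
    have hrange : ∀ a : Int, a = x ∨ a = y ∨ a = z ∨ a = d → 1 ≤ a ∧ a < N := by
      intro a ha
      rcases ha with rfl | rfl | rfl | rfl <;> omega
    rcases hpos with h | ⟨h1, h2⟩ | ⟨h1, h2⟩ | h
    · refine main [d, x, y, z] (by simp [List.pairwise_cons]; omega) (by simp; omega)
        (by intro a ha; apply hrange; simp at ha; tauto)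
        ((List.sublist_cons_self _ _ : [x,y,z].Sublist (d :: [x,y,z]))) rfl
    · refine main [x, d, y, z] (by simp [List.pairwise_cons]; omega) (by simp; omega)
        (by intro a ha; apply hrange; simp at ha; tauto)
        (List.cons_sublist_cons.2 (List.sublist_cons_self _ _)) rfl
    · refine main [x, y, d, z] (by simp [List.pairwise_cons]; omega) (by simp; omega)
        (by intro a ha; apply hrange; simp at ha; tauto)
        (List.cons_sublist_cons.2 (List.cons_sublist_cons.2 (List.sublist_cons_self _ _))) rfl
    · refine main [x, y, z, d] (by simp [List.pairwise_cons]; omega) (by simp; omega)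
        (by intro a ha; apply hrange; simp at ha; tauto)
        (List.cons_sublist_cons.2 (List.cons_sublist_cons.2 (List.cons_sublist_cons.2
          (List.nil_sublist _)))) rfl

-- ===== VERDICT (by name: the statement is the Claim_ definition above) =====
theorem solution_spec : Claim_equal_solution := by
  intro N _
  show solution N = solution_alt N
  simp only [solution, solution_alt]
  rw [anyComb_eq]
  rw [show ((PySem.List.combinations (PySem.List.pyRange 1 N 1) 4).any
      (fun l => l.sum == N && decide (3 ≤ l.countP (fun x => (pseudoPrimes N).contains x))))
      = any3 N (pseudoPrimes N) from Bool.eq_iff_iff.2 (by simpa using search_iff N)]
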